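-- pv_equiv track=rewrite | github.com/22eming/- | programmers/Level1/직업군추천.py | solution
-- ===== SOURCE A (Python) =====
-- def solution(table, languages, preference):
--     answer = ''
--     cnt = 0
--     for t in table:
--         t = t.split()
--         langCnt = 0
--         for i, lang in enumerate(languages):
--             if lang in t:
--                 langCnt += (6 - t.index(lang)) * preference[i]
--
--         if langCnt > cnt:
--             answer = t[0]
--             cnt = langCnt
--         elif langCnt == cnt:
--             cnt = langCnt
--             answer = sorted([t[0], answer])[0]
--
--     return answer
-- ===== SOURCE B (Python) =====
-- def solution(table, languages, preference):
--     # Build-then-reduce: score every row once, then select by global max + lexicographic min.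
--     scored = []
--     for row in table:
--         parts = row.split()
--         score = sum((6 - parts.index(lang)) * preference[i]
--                     for i, lang in enumerate(languages) if lang in parts)
--         scored.append((score, parts[0]))
--     best = max((s for s, _ in scored), default=0)
--     if best <= 0:
--         return ''
--     return min(name for s, name in scored if s == best)
-- ===== Notes on version B (the rewrite author's own statement) =====
-- stated objective: alternative
-- what changed: Replaces A's running-best/tie-min state machine over rows with a build-then-reduce pipeline: score every row into a (score, name) list, take the global max score, and return the lexicographically smallest name among max-scoring rows (empty string when the max is not positive).
-- outside the precondition, e.g. on solution(['java a', '   '], ['java'], [2]): A returns 'java', B raises IndexError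
import Mathlib
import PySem

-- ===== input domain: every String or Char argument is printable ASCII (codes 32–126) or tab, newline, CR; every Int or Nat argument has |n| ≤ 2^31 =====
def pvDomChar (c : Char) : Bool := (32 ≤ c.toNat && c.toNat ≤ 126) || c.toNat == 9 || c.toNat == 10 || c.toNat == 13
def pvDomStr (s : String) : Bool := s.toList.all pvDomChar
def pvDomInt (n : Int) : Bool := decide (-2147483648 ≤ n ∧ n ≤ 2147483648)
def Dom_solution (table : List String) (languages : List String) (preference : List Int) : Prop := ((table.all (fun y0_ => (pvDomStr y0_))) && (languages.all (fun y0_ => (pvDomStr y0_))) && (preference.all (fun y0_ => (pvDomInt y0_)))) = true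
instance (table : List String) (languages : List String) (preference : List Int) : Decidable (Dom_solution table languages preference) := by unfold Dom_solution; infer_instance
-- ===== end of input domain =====

-- B replaces A's running-best/tie-min state machine with a build-then-reduce pipeline
-- (score all rows, global max, lexicographic min among max rows); alternative decomposition, same cost.


-- ===== PORT A =====
-- A's running answer/cnt loop; parts.headD "" is t[0] and pyGetD is preference[i],
-- exact under Pre_ (rows split to a nonempty word list, matched language indices within preference).
def solution (table : List String) (languages : List String) (preference : List Int) : String :=
  (table.foldl (fun (st : String × Int) t =>
    let parts := PySem.Str.split₀ t
    let langCnt := (PySem.List.enumerate languages 0).foldl (fun acc p =>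
        if p.2 ∈ parts then
          acc + (6 - (((PySem.List.index? parts p.2).getD 0 : Nat) : Int)) * PySem.List.pyGetD preference p.1 0
        else acc) 0
    if st.2 < langCnt then (parts.headD "", langCnt)
    else if langCnt = st.2 then
      ((PySem.List.sorted [parts.headD "", st.1] (fun x => x) false).headD "", langCnt)
    else st) ("", 0)).1

-- ===== PORT B =====
-- Source B's scored list: (score, first word) per row; headD ""/pyGetD exact under Pre_ as in port A.
def pvScored (table : List String) (languages : List String) (preference : List Int) : List (Int × String) :=
  table.map (fun row =>
    let parts := PySem.Str.split₀ row
    (((PySem.List.enumerate languages 0).filterMap (fun p =>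
        if p.2 ∈ parts then
          some ((6 - (((PySem.List.index? parts p.2).getD 0 : Nat) : Int)) * PySem.List.pyGetD preference p.1 0)
        else none)).foldl (· + ·) 0,
     parts.headD ""))

-- Source B's best = max(scores, default=0)
def pvBest (scored : List (Int × String)) : Int :=
  match scored with
  | [] => 0
  | x :: rest => rest.foldl (fun m p => max m p.1) x.1

-- Python's min over a nonempty list of strings: first element, then running min (B's branch guarantees nonempty).
def pvMinL (ns : List String) : String :=
  match ns with
  | [] => ""
  | n :: t => t.foldl min n

def solution_alt (table : List String) (languages : List String) (preference : List Int) : String :=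
  if pvBest (pvScored table languages preference) ≤ 0 then ""
  else pvMinL (((pvScored table languages preference).filter
      (fun q => q.1 == pvBest (pvScored table languages preference))).map (fun q => q.2))

-- ===== PRECONDITION & SPEC =====
-- Pre_ excludes rows that split to no words (A's t[0] raises IndexError when such a row ties the
-- running best, and B's parts[0] raises on every such row) and inputs where some language matched in a
-- row sits at a position past the end of preference (both A and B raise IndexError on preference[i] there).
def Pre_solution (table : List String) (languages : List String) (preference : List Int) : Prop :=
  (∀ t ∈ table, PySem.Str.split₀ t ≠ []) ∧
  (∀ p ∈ PySem.List.enumerate languages 0,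
     (∃ t ∈ table, p.2 ∈ PySem.Str.split₀ t) → p.1 < (preference.length : Int))
instance (table : List String) (languages : List String) (preference : List Int) : Decidable (Pre_solution table languages preference) := by unfold Pre_solution; infer_instance

def pvWitness_solution : List String × List String × List Int :=
  (["python 2 3", "java 1 2"], ["python", "java"], [5, 2])

def Spec_solution (table : List String) (languages : List String) (preference : List Int) (out : String) : Prop := out = solution_alt table languages preference
instance (table : List String) (languages : List String) (preference : List Int) (out : String) : Decidable (Spec_solution table languages preference out) := by unfold Spec_solution; infer_instance

-- ===== CLAIM (what is proved, stated in full; the proofs are below) =====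
def Claim_equal_solution : Prop := ∀ (table : List String) (languages : List String) (preference : List Int), Dom_solution table languages preference → Pre_solution table languages preference → Spec_solution table languages preference (solution table languages preference)

-- ===== LEMMAS AND PROOFS =====

-- the per-row score, as A's inner loop computes it
def pvScore (languages : List String) (preference : List Int) (parts : List String) : Int :=
  (PySem.List.enumerate languages 0).foldl (fun acc p =>
      if p.2 ∈ parts then
        acc + (6 - (((PySem.List.index? parts p.2).getD 0 : Nat) : Int)) * PySem.List.pyGetD preference p.1 0
      else acc) 0

def pvRow (languages : List String) (preference : List Int) (t : String) : Int × String :=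
  (pvScore languages preference (PySem.Str.split₀ t), (PySem.Str.split₀ t).headD "")

-- A's row update, written on (score, name) pairs
def pvStep (st : String × Int) (q : Int × String) : String × Int :=
  if st.2 < q.1 then (q.2, q.1)
  else if q.1 = st.2 then (min q.2 st.1, q.1)
  else st

def pvMx (rows : List (Int × String)) (c : Int) : Int :=
  rows.foldl (fun m p => max m p.1) c

def pvPick (rows : List (Int × String)) (ans : String) (c : Int) : String :=
  pvMinL ((if c = pvMx rows c then [ans] else []) ++
          (rows.filter (fun p => p.1 == pvMx rows c)).map (fun p => p.2))

lemma pv_empty_le (s : String) : ("" : String) ≤ s :=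
  String.le_iff_toList_le.mpr (not_lt.mp (List.not_lt_nil s.toList))

lemma pv_sorted_head (a b : String) :
    (PySem.List.sorted [a, b] (fun x => x) false).headD "" = min a b := by
  by_cases h : a ≤ b
  · have : PySem.List.sorted [a, b] (fun x => x) false = [a, b] := by
      apply PySem.List.sorted_eq_self_of_pairwise
      simp [String.le_iff_toList_le.mp h]
    simp [this, min_eq_left h]
  · have hlt : b < a := lt_of_not_ge h
    have : PySem.List.sorted [a, b] (fun x => x) false = [b, a] := by
      apply PySem.List.sorted_eq_of_perm_of_pairwise_lt
      · exact List.Perm.swap _ _ _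
      · simp [String.lt_iff_toList_lt.mp hlt]
    simp [this, min_eq_right hlt.le]

lemma pv_filterMap_sum (l : List (Int × String)) (f : Int × String → Int)
    (P : Int × String → Prop) [DecidablePred P] :
    ∀ A : Int, (l.filterMap (fun p => if P p then some (f p) else none)).foldl (· + ·) A
      = l.foldl (fun acc p => if P p then acc + f p else acc) A := by
  induction l with
  | nil => intro A; simp
  | cons p l ih =>
    intro A
    by_cases h : P p <;> simp [h, ih]

lemma pv_mx_max (r : List (Int × String)) :
    ∀ a c : Int, r.foldl (fun m p => max m p.1) (max a c) = max a (r.foldl (fun m p => max m p.1) c) := by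
  induction r with
  | nil => intro a c; rfl
  | cons p r ih =>
    intro a c
    simp only [List.foldl_cons, max_assoc, ih]

lemma pv_le_mx (rows : List (Int × String)) (c : Int) : c ≤ pvMx rows c :=
  (PySem.List.le_foldl_max_int rows (fun p => p.1) c).1

lemma pv_loop (rows : List (Int × String)) :
    ∀ (ans : String) (c : Int),
      rows.foldl pvStep (ans, c) = (pvPick rows ans c, pvMx rows c) := by
  induction rows with
  | nil => intro ans c; simp [pvPick, pvMx, pvMinL]
  | cons q rest ih =>
    intro ans c
    obtain ⟨s, n⟩ := q
    have hMx : pvMx ((s, n) :: rest) c = pvMx rest (max c s) := rfl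
    simp only [List.foldl_cons, pvStep]
    by_cases h1 : c < s
    · rw [if_pos h1, ih]
      have hM : pvMx ((s, n) :: rest) c = pvMx rest s := by
        rw [hMx, max_eq_right h1.le]
      have hcM : ¬ (c = pvMx rest s) := by
        have := pv_le_mx rest s
        omega
      have hPick : pvPick ((s, n) :: rest) ans c = pvPick rest n s := by
        unfold pvPick
        rw [hM]
        by_cases hsM : s = pvMx rest s
        · simp [← hsM, h1.ne]
        · simp [hcM, hsM]
      rw [hPick, hM]
    · by_cases h2 : s = c
      · subst h2
        rw [if_neg h1, if_pos rfl, ih]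
        have hM : pvMx ((s, n) :: rest) s = pvMx rest s := by
          rw [hMx, max_self]
        have hPick : pvPick ((s, n) :: rest) ans s = pvPick rest (min n ans) s := by
          unfold pvPick
          rw [hM]
          by_cases hsM : s = pvMx rest s
          · simp [← hsM, pvMinL, min_comm n ans]
          · simp [hsM]
        rw [hPick, hM]
      · have h3 : s < c := by
          rcases lt_trichotomy s c with h | h | h
          · exact h
          · exact absurd h h2
          · exact absurd h h1
        rw [if_neg h1, if_neg h2, ih]
        have hM : pvMx ((s, n) :: rest) c = pvMx rest c := by
          rw [hMx, max_eq_left h3.le]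
        have hsM : ¬ (s = pvMx rest c) := by
          have := pv_le_mx rest c
          omega
        have hPick : pvPick ((s, n) :: rest) ans c = pvPick rest ans c := by
          unfold pvPick
          rw [hM]
          simp [hsM]
        rw [hPick, hM]

-- A's loop over the table is pvStep over the scored rows
lemma pv_solution_eq (table : List String) (languages : List String) (preference : List Int) :
    solution table languages preference
      = ((table.map (pvRow languages preference)).foldl pvStep ("", 0)).1 := by
  unfold solution
  rw [List.foldl_map]
  congr 1
  apply PySem.List.foldl_congr_mem
  intro st t _
  simp only [pvStep, pvRow, pvScore, pv_sorted_head]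

-- B's scored list is the pvRow list
lemma pv_scored_eq (table : List String) (languages : List String) (preference : List Int) :
    pvScored table languages preference = table.map (pvRow languages preference) := by
  unfold pvScored
  apply List.map_congr_left
  intro t _
  simp only [pvRow, pvScore]
  rw [pv_filterMap_sum]

lemma pv_minL_empty (ns : List String) : pvMinL ("" :: ns) = "" := by
  simp only [pvMinL]
  induction ns with
  | nil => rfl
  | cons n t ih =>
    rw [List.foldl_cons, min_eq_left (pv_empty_le n)]
    exact ih

-- ===== VERDICT (by name: the statement is the Claim_ definition above) =====
theorem solution_spec : Claim_equal_solution := by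
  intro table languages preference _hdom _hpre
  unfold Spec_solution
  rw [pv_solution_eq, pv_loop]
  unfold solution_alt
  rw [pv_scored_eq]
  cases hsc : table.map (pvRow languages preference) with
  | nil => simp [pvPick, pvMx, pvMinL, pvBest]
  | cons x r =>
    have hM : pvMx (x :: r) 0 = max 0 (pvBest (x :: r)) := by
      show r.foldl (fun m p => max m p.1) (max 0 x.1) = _
      rw [pv_mx_max]
      rfl
    by_cases hb : pvBest (x :: r) ≤ 0
    · rw [if_pos hb]
      have hM0 : pvMx (x :: r) 0 = 0 := by rw [hM]; omega
      show pvPick (x :: r) "" 0 = ""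
      simp only [pvPick, hM0]
      exact pv_minL_empty _
    · rw [if_neg hb]
      have hMb : pvMx (x :: r) 0 = pvBest (x :: r) := by rw [hM]; omega
      have h0M : ¬ ((0 : Int) = pvBest (x :: r)) := by omega
      show pvPick (x :: r) "" 0 = _
      simp only [pvPick, hMb, if_neg h0M, List.nil_append]
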